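-- pv_equiv track=rewrite | github.com/i-lijun/UnsupConstParseEval | evaluate.py | get_F1_score_intermediates
-- ===== SOURCE A (Python) =====
-- import collections
--
-- def get_F1_score_intermediates(gold_spans, pred_spans):
--     """Get intermediate results for calculating the F1 score
--     """
--     n_true_positives = 0
--     gold_span_counter = collections.Counter(gold_spans)
--     pred_span_counter = collections.Counter(pred_spans)
--     unique_spans = set(gold_spans + pred_spans)
--     for span in unique_spans:
--         n_true_positives += min(gold_span_counter[span],
--                                 pred_span_counter[span])
--     return n_true_positives, len(gold_spans), len(pred_spans)
-- ===== SOURCE B (Python) =====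
-- def get_F1_score_intermediates(gold_spans, pred_spans):
--     """Get intermediate results for calculating the F1 score
--     """
--     remaining = list(pred_spans)
--     n_true_positives = 0
--     for span in gold_spans:
--         if span in remaining:
--             remaining.remove(span)
--             n_true_positives += 1
--     return n_true_positives, len(gold_spans), len(pred_spans)
-- ===== Notes on version B (the rewrite author's own statement) =====
-- stated objective: simpler
-- what changed: Replaces the two Counters plus set-of-unions min-sum with a direct greedy matching: walk the gold spans once, removing each matched span from a working copy of the predicted spans; no Counter, no set.
import Mathlib
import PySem

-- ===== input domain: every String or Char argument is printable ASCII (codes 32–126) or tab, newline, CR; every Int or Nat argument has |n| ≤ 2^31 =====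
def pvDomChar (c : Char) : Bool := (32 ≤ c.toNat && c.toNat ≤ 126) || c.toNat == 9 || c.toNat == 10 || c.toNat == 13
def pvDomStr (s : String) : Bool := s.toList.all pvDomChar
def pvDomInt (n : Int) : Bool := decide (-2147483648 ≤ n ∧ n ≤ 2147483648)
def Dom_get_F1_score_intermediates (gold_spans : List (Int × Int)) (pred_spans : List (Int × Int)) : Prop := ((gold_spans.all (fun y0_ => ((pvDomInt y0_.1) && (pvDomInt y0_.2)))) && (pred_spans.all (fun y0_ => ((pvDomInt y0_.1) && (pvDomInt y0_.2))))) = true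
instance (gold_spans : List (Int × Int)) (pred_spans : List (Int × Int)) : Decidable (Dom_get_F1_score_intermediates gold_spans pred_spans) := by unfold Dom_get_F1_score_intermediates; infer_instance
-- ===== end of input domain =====

-- B replaces the Counter/set min-sum with a one-pass greedy matching against a
-- shrinking copy of pred_spans (objective: simpler; not claimed faster).

-- ===== PORT A =====
def get_F1_score_intermediates (gold_spans : List (Int × Int)) (pred_spans : List (Int × Int)) : Int × Int × Int :=
  let gold_span_counter := PySem.Dict.counter gold_spans
  let pred_span_counter := PySem.Dict.counter pred_spans
  let unique_spans := PySem.Set.ofList (gold_spans ++ pred_spans)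
  let n_true_positives : Int :=
    unique_spans.foldl
      (fun acc span => acc + min (gold_span_counter.getD span 0) (pred_span_counter.getD span 0)) 0
  (n_true_positives, (gold_spans.length : Int), (pred_spans.length : Int))

-- ===== PORT B =====
-- the 'for span in gold_spans' loop of Source B: state = (remaining, tp)
def pvMatchLoop (gs : List (Int × Int)) (remaining : List (Int × Int)) (tp : Int) : Int :=
  match gs with
  | [] => tp
  | g :: rest =>
      if g ∈ remaining then pvMatchLoop rest (remaining.erase g) (tp + 1)
      else pvMatchLoop rest remaining tp

def get_F1_score_intermediates_alt (gold_spans : List (Int × Int)) (pred_spans : List (Int × Int)) : Int × Int × Int :=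
  (pvMatchLoop gold_spans pred_spans 0, (gold_spans.length : Int), (pred_spans.length : Int))

-- ===== PRECONDITION & SPEC =====
def Spec_get_F1_score_intermediates (gold_spans : List (Int × Int)) (pred_spans : List (Int × Int)) (out : Int × Int × Int) : Prop := out = get_F1_score_intermediates_alt gold_spans pred_spans
instance (gold_spans : List (Int × Int)) (pred_spans : List (Int × Int)) (out : Int × Int × Int) : Decidable (Spec_get_F1_score_intermediates gold_spans pred_spans out) := by unfold Spec_get_F1_score_intermediates; infer_instance

-- ===== CLAIM (what is proved, stated in full; the proofs are below) =====
def Claim_equal_get_F1_score_intermediates : Prop := ∀ (gold_spans : List (Int × Int)) (pred_spans : List (Int × Int)), Dom_get_F1_score_intermediates gold_spans pred_spans → Spec_get_F1_score_intermediates gold_spans pred_spans (get_F1_score_intermediates gold_spans pred_spans)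

-- ===== LEMMAS AND PROOFS =====

-- The port of B erases/counts with the default `BEq (Int × Int)` instance while the
-- Multiset lemmas use `instBEqOfDecidableEq`; both are lawful, so the results agree.
theorem pv_count_canon (l : List (Int × Int)) (a : Int × Int) :
    l.count a = @List.count (Int × Int) (@instBEqOfDecidableEq (Int × Int) instDecidableEqProd) a l := by
  induction l with
  | nil => rfl
  | cons b t ih => by_cases h : b = a <;> simp [h, ih]

theorem pv_erase_canon (l : List (Int × Int)) (a : Int × Int) :
    l.erase a = @List.erase (Int × Int) (@instBEqOfDecidableEq (Int × Int) instDecidableEqProd) l a := by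
  induction l with
  | nil => rfl
  | cons b t ih => by_cases h : b = a <;> simp [h, ih]

-- B's loop computes the multiset-intersection cardinality.
theorem pvMatchLoop_eq (gs ps : List (Int × Int)) (tp : Int) :
    pvMatchLoop gs ps tp = tp + (((gs : Multiset (Int × Int)) ∩ (ps : Multiset (Int × Int))).card : Int) := by
  induction gs generalizing ps tp with
  | nil => simp [pvMatchLoop]
  | cons g rest ih =>
    by_cases h : g ∈ ps
    · have hmem : g ∈ (ps : Multiset (Int × Int)) := by simpa using h
      simp only [pvMatchLoop, if_pos h, ih]
      rw [show ((g :: rest : List (Int × Int)) : Multiset (Int × Int)) = g ::ₘ (rest : Multiset (Int × Int)) from rfl,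
        Multiset.cons_inter_of_pos _ hmem]
      have : ((ps.erase g : List (Int × Int)) : Multiset (Int × Int)) = (ps : Multiset (Int × Int)).erase g := by
        rw [pv_erase_canon]
        simp
      rw [this]
      simp; ring
    · have hmem : g ∉ (ps : Multiset (Int × Int)) := by simpa using h
      simp only [pvMatchLoop, if_neg h, ih]
      rw [show ((g :: rest : List (Int × Int)) : Multiset (Int × Int)) = g ::ₘ (rest : Multiset (Int × Int)) from rfl,
        Multiset.cons_inter_of_neg _ hmem]

-- A's sum over the distinct spans also computes that cardinality.
theorem pvASum_eq (gs ps : List (Int × Int)) :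
    (PySem.Set.ofList (gs ++ ps)).foldl
      (fun acc span => acc + min ((PySem.Dict.counter gs).getD span 0) ((PySem.Dict.counter ps).getD span 0)) 0
      = (((gs : Multiset (Int × Int)) ∩ (ps : Multiset (Int × Int))).card : Int) := by
  rw [PySem.List.foldl_add]
  simp only [PySem.Dict.getD_counter, zero_add]
  have hnodup : (PySem.Set.ofList (gs ++ ps)).Nodup := PySem.Set.nodup_ofList _
  have hsum :
      ((PySem.Set.ofList (gs ++ ps)).map
        (fun span => min ((gs.count span : Int)) ((ps.count span : Int)))).sum
      = ∑ x ∈ (PySem.Set.ofList (gs ++ ps)).toFinset,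
          min ((gs.count x : Int)) ((ps.count x : Int)) := by
    rw [List.sum_toFinset _ hnodup]
  rw [hsum]
  have hsub : ((gs : Multiset (Int × Int)) ∩ (ps : Multiset (Int × Int))).toFinset ⊆
      (PySem.Set.ofList (gs ++ ps)).toFinset := by
    intro x hx
    simp only [Multiset.mem_toFinset, Multiset.mem_inter] at hx
    simp only [List.mem_toFinset, PySem.Set.mem_ofList, List.mem_append]
    exact Or.inl (by simpa using hx.1)
  have hcard : (((gs : Multiset (Int × Int)) ∩ (ps : Multiset (Int × Int))).card : Int)
      = ∑ x ∈ ((gs : Multiset (Int × Int)) ∩ (ps : Multiset (Int × Int))).toFinset,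
          ((((gs : Multiset (Int × Int)) ∩ (ps : Multiset (Int × Int))).count x : Int)) := by
    rw [← Multiset.toFinset_sum_count_eq]
    push_cast
    rfl
  rw [hcard]
  rw [Finset.sum_subset hsub]
  · apply Finset.sum_congr rfl
    intro x _
    rw [Multiset.count_inter]
    push_cast
    rw [Multiset.coe_count, Multiset.coe_count, ← pv_count_canon, ← pv_count_canon]
  · intro x _ hx
    simp only [Multiset.mem_toFinset] at hx
    exact_mod_cast Multiset.count_eq_zero.mpr hx

-- ===== VERDICT (by name: the statement is the Claim_ definition above) =====
theorem get_F1_score_intermediates_spec : Claim_equal_get_F1_score_intermediates := by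
  intro gs ps _
  unfold Spec_get_F1_score_intermediates get_F1_score_intermediates get_F1_score_intermediates_alt
  simp only [pvMatchLoop_eq, zero_add]
  rw [pvASum_eq]
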